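-- pv_equiv track=rewrite | github.com/wylu/algorithm | string/最长回文前缀.py | get_longest_palindrome_prefix
-- ===== SOURCE A (Python) =====
-- def get_longest_palindrome_prefix(s: str) -> int:
--     # 计算失配指针（next 数组）
--     n = len(s)
--     fail = [-1] * n
--     k, j = -1, 0
--     while j < n - 1:
--         if k == -1 or s[k] == s[j]:
--             k += 1
--             j += 1
--             fail[j] = k
--         else:
--             k = fail[k]
--
--     best = -1
--     for i in range(n - 1, -1, -1):
--         while best != -1 and s[best + 1] != s[i]:
--             best = fail[best]
--         if s[best + 1] == s[i]:
--             best += 1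
--
--     return best + 1
-- ===== SOURCE B (Python) =====
-- def get_longest_palindrome_prefix(s: str) -> int:
--     n = len(s)
--     if n == 0:
--         return 0
--     # failure links by their definition: longest proper border of each prefix,
--     # found by direct comparison (b = 0 always qualifies, so max is on a nonempty range)
--     fail = [-1] + [max(b for b in range(j) if s[:b] == s[j - b:j]) for j in range(1, n)]
--     # precompute the scanner's transition table over the alphabet of s:
--     # step[(p - 1, c)] = next state from state p on character c
--     alpha = set(s)
--     step = {}
--     for c in alpha:
--         step[(-1, c)] = 1 if s[0] == c else 0
--     for m in range(n - 1):
--         for c in alpha: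
--             step[(m, c)] = m + 2 if s[m + 1] == c else step[(fail[m], c)]
--     # table-driven scan of the reversed string
--     p = 0
--     for c in reversed(s):
--         p = step[(p - 1, c)]
--     return p
-- ===== Notes on version B (the rewrite author's own statement) =====
-- stated objective: alternative
-- what changed: Replaces the KMP machinery by a table-driven automaton: failure links are found by direct longest-proper-border search (no self-matching loop), the per-character transition function is precomputed into a dictionary by dynamic programming over states, and the reversed string is then scanned with plain table lookups instead of an inner failure-chain while loop.
import Mathlib
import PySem

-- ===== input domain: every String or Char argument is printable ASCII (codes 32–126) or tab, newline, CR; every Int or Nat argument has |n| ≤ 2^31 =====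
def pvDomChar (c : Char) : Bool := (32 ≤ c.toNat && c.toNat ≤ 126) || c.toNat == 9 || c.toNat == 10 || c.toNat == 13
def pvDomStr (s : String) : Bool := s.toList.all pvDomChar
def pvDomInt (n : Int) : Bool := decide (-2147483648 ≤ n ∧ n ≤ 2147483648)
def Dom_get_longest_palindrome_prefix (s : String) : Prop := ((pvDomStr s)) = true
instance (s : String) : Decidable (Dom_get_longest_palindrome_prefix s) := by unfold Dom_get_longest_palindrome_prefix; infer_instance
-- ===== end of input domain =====

-- B replaces A's on-line KMP machinery by a precomputed transition table: failure links are found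
-- by direct longest-proper-border search, the per-character transitions are tabulated by dynamic
-- programming over states, and the reversed string is scanned with plain table lookups.

-- ===== PORT A =====
-- the `while j < n - 1` failure-array loop; the fuel argument only makes the loop total
-- (2*len+2 iterations always suffice: the measure 2*(n-1-j) + (k+1) drops each iteration, proved
-- below in pvAFail_inv).  s[k], s[j], fail[k] are ported with pyGetD: every index Python actually
-- reads is in range (k = -1 short-circuits the disjunction exactly as Python's `or` does),
-- so pyGetD is exact here.
def pvAFail (l : List Char) (n : Int) : Nat → List Int × Int × Int → List Int × Int × Int
  | 0, st => st
  | fuel+1, (fail, k, j) =>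
    if j < n - 1 then
      if k = -1 ∨ PySem.List.pyGetD l k ' ' = PySem.List.pyGetD l j ' ' then
        pvAFail l n fuel (PySem.List.pySetD fail (j + 1) (k + 1), k + 1, j + 1)
      else
        pvAFail l n fuel (fail, PySem.List.pyGetD fail k (-1), j)
    else (fail, k, j)

-- the inner `while best != -1 and s[best+1] != s[i]` loop; fuel len+1 suffices (best strictly
-- decreases along the failure chain, proved below in pvADescend_stable)
def pvADescend (l : List Char) (fail : List Int) (c : Char) : Nat → Int → Int
  | 0, best => best
  | fuel+1, best =>
    if best ≠ -1 ∧ PySem.List.pyGetD l (best + 1) ' ' ≠ c then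
      pvADescend l fail c fuel (PySem.List.pyGetD fail best (-1))
    else best

-- the failure value read at a state: -1 ≤ F[best] ≤ best - 1

def get_longest_palindrome_prefix (s : String) : Int :=
  let l := s.toList
  let n : Int := PySem.Str.len s
  let fail := (pvAFail l n (2 * l.length + 2) (List.replicate l.length (-1), -1, 0)).1
  let best := (PySem.List.pyRange (n - 1) (-1) (-1)).foldl (fun best i =>
      let best := pvADescend l fail (PySem.List.pyGetD l i ' ') (l.length + 1) best
      if PySem.List.pyGetD l (best + 1) ' ' = PySem.List.pyGetD l i ' ' then best + 1 else best)
    (-1)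
  best + 1

-- ===== PORT B =====
-- longest proper border of s[:j] by direct comparison; b = 0 always passes the filter, so the
-- max is over a nonempty list and the .getD default is never used (Python's max never raises here)
def pvBBorder (l : List Char) (j : Int) : Int :=
  (PySem.List.max? ((PySem.List.pyRange 0 j 1).filter (fun b =>
      PySem.List.slice l none (some b) = PySem.List.slice l (some (j - b)) (some j)))
    (fun x => x)).getD 0

-- the transition-table construction; every key looked up was inserted earlier (fail[m] < m),
-- so the .getD default 0 is never used (Python's dict lookup never raises here).  The Python
-- iterates the set `alpha` only to fill the table, which is then only looked up, so the result
-- does not depend on the set's iteration order.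
def pvBTable (l : List Char) (fail : List Int) (alpha : List Char) (n : Int) :
    PySem.Dict (Int × Char) Int :=
  let d := alpha.foldl (fun d c =>
      d.insert (-1, c) (if PySem.List.pyGetD l 0 ' ' = c then 1 else 0)) PySem.Dict.empty
  (PySem.List.pyRange 0 (n - 1) 1).foldl (fun d m =>
      alpha.foldl (fun d c =>
        d.insert (m, c) (if PySem.List.pyGetD l (m + 1) ' ' = c then m + 2
                         else d.getD (PySem.List.pyGetD fail m (-1), c) 0)) d) d

-- a fold of inserts under a fixed first key component, value independent of the dict

def get_longest_palindrome_prefix_alt (s : String) : Int :=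
  let l := s.toList
  let n : Int := PySem.Str.len s
  if n = 0 then 0
  else
    let fail : List Int := (-1) :: (PySem.List.pyRange 1 n 1).map (pvBBorder l)
    let alpha : PySem.Set Char := PySem.Set.ofList l
    let step := pvBTable l fail alpha n
    l.reverse.foldl (fun p c => step.getD (p - 1, c) 0) 0

-- ===== PRECONDITION & SPEC =====
def Spec_get_longest_palindrome_prefix (s : String) (out : Int) : Prop := out = get_longest_palindrome_prefix_alt s
instance (s : String) (out : Int) : Decidable (Spec_get_longest_palindrome_prefix s out) := by unfold Spec_get_longest_palindrome_prefix; infer_instance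

-- ===== CLAIM (what is proved, stated in full; the proofs are below) =====
def Claim_equal_get_longest_palindrome_prefix : Prop := ∀ (s : String), Dom_get_longest_palindrome_prefix s → Spec_get_longest_palindrome_prefix s (get_longest_palindrome_prefix s)

-- ===== LEMMAS AND PROOFS =====

def pvChr (l : List Char) (b : Nat) : Char := l.getD b ' '

def pvMB (l : List Char) (j : Nat) : Nat :=
  Nat.findGreatest (fun b => l.take b <:+ l.take j) (j - 1)

def pvFailSpec (l : List Char) (F : List Int) : Prop :=
  F.length = l.length ∧
  ∀ m : Nat, m < l.length → F.getD m (-1) = if m = 0 then -1 else (pvMB l m : Int)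

theorem pv_getD_nonneg {α : Type} (l : List α) (d : α) (i : Int) (h : 0 ≤ i) :
    PySem.List.pyGetD l i d = l.getD i.toNat d := by
  by_cases hlt : i < l.length
  · rw [PySem.List.pyGetD_eq_getElem l d h hlt]
    rw [List.getD_eq_getElem l d (by omega)]
  · rw [PySem.List.pyGetD_of_none l i d (by
      rw [PySem.List.pyGet?_eq_none_iff]
      simp [PySem.Raise.InRange]
      omega)]
    rw [List.getD_eq_default l d (by omega)]

theorem pv_take_succ (l : List Char) (b : Nat) (h : b < l.length) :
    l.take (b + 1) = l.take b ++ [pvChr l b] := by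
  have h2 : l[b]? = some l[b] := List.getElem?_eq_getElem h
  rw [List.take_add_one, h2]
  simp [pvChr, List.getD, h2]

theorem pv_app_suffix (a b : Char) (l₁ l₂ : List Char) :
    (l₁ ++ [a]) <:+ (l₂ ++ [b]) ↔ (l₁ <:+ l₂ ∧ a = b) := by
  rw [← List.reverse_prefix]
  simp only [List.reverse_append, List.reverse_cons, List.reverse_nil, List.nil_append,
    List.singleton_append, List.cons_prefix_cons, List.reverse_prefix]
  tauto

theorem pv_ext (l : List Char) (b j : Nat) (hb : b < l.length) (hj : j < l.length) :
    l.take (b + 1) <:+ l.take (j + 1) ↔ (l.take b <:+ l.take j ∧ pvChr l b = pvChr l j) := by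
  rw [pv_take_succ l b hb, pv_take_succ l j hj, pv_app_suffix]

theorem pv_mb_le (l : List Char) (j : Nat) : pvMB l j ≤ j - 1 :=
  Nat.findGreatest_le _

theorem pv_mb_border (l : List Char) (j : Nat) : l.take (pvMB l j) <:+ l.take j := by
  unfold pvMB
  exact Nat.findGreatest_spec (P := fun b => List.take b l <:+ List.take j l) (Nat.zero_le _) (show List.take 0 l <:+ List.take j l from List.nil_suffix)

theorem pv_mb_greatest (l : List Char) (j b : Nat) (hb : b ≤ j - 1)
    (h : l.take b <:+ l.take j) : b ≤ pvMB l j := by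
  by_contra hc
  have hlt : pvMB l j < b := Nat.not_le.mp hc
  unfold pvMB at hlt
  exact Nat.findGreatest_is_greatest hlt hb h

theorem pv_suffix_of_suffix (l : List Char) (b k j : Nat) (_hk : k ≤ l.length)
    (h1 : l.take b <:+ l.take j) (h2 : l.take k <:+ l.take j) (hbk : b ≤ k) :
    l.take b <:+ l.take k :=
  List.suffix_of_suffix_length_le h1 h2 (by simp; omega)

theorem pv_mb_succ (l : List Char) (j : Nat) (k : Int) (hj : j + 1 ≤ l.length)
    (hk1 : -1 ≤ k) (hk2 : k ≤ (j : Int) - 1)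
    (hS : 0 ≤ k → l.take k.toNat <:+ l.take j)
    (hI3 : ∀ b : Nat, (b : Int) < j → l.take b <:+ l.take j → k < (b : Int) →
      pvChr l b ≠ pvChr l j)
    (hext : k = -1 ∨ pvChr l k.toNat = pvChr l j) :
    (pvMB l (j + 1) : Int) = k + 1 := by
  have hK1 : ((k + 1).toNat : Int) = k + 1 := by omega
  have hle : (k + 1).toNat ≤ pvMB l (j + 1) := by
    apply pv_mb_greatest l (j + 1) _ (by omega)
    rcases hext with h | h
    · subst h
      exact (show List.take 0 l <:+ List.take (j+1) l from List.nil_suffix)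
    · rcases Int.le_iff_lt_or_eq.mp hk1 with hk0 | hk0
      · have hk0' : 0 ≤ k := by omega
        have : (k + 1).toNat = k.toNat + 1 := by omega
        rw [this, (pv_ext l k.toNat j (by omega) (by omega))]
        exact ⟨hS hk0', h⟩
      · have h0 : (k + 1).toNat = 0 := by omega
        rw [h0]
        exact (show List.take 0 l <:+ List.take (j+1) l from List.nil_suffix)
  have hge : pvMB l (j + 1) ≤ (k + 1).toNat := by
    by_contra hc
    have hgt : (k + 1).toNat < pvMB l (j + 1) := by omega
    set b := pvMB l (j + 1) with hbdef
    have hble : b ≤ j := by have := pv_mb_le l (j + 1); omega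
    have hb1 : 1 ≤ b := by omega
    have hbS : l.take b <:+ l.take (j + 1) := pv_mb_border l (j + 1)
    have hbeq : b = (b - 1) + 1 := by omega
    rw [hbeq, pv_ext l (b - 1) j (by omega) (by omega)] at hbS
    exact hI3 (b - 1) (by omega) hbS.1 (by omega) hbS.2
  omega

theorem pvAFail_inv (l : List Char) (n : Int) (hn : n = l.length) :
    ∀ fuel : Nat, ∀ F : List Int, ∀ k j : Int,
    F.length = l.length →
    0 ≤ j → j ≤ n - 1 →
    -1 ≤ k → k ≤ j - 1 →
    (∀ m : Nat, (m : Int) ≤ j → m < l.length →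
       F.getD m (-1) = if m = 0 then -1 else (pvMB l m : Int)) →
    (0 ≤ k → l.take k.toNat <:+ l.take j.toNat) →
    (∀ b : Nat, (b : Int) < j → l.take b <:+ l.take j.toNat → k < (b : Int) →
       pvChr l b ≠ pvChr l j.toNat) →
    (2 * (n - 1 - j) + (k + 1)).toNat < fuel →
    pvFailSpec l (pvAFail l n fuel (F, k, j)).1 := by
  intro fuel
  induction fuel with
  | zero => intro F k j _ _ _ _ _ _ _ _ hfuel; omega
  | succ fuel ih =>
    intro F k j hlen hj0 hjn hk1 hk2 hF hS hI3 hfuel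
    rw [pvAFail]
    by_cases hjlt : j < n - 1
    · rw [if_pos hjlt]
      by_cases htest : k = -1 ∨ PySem.List.pyGetD l k ' ' = PySem.List.pyGetD l j ' '
      · rw [if_pos htest]
        -- the extension succeeds: fail[j+1] := k+1 = pvMB (j+1)
        have hext : k = -1 ∨ pvChr l k.toNat = pvChr l j.toNat := by
          rcases htest with h | h
          · exact Or.inl h
          · rcases Int.le_iff_lt_or_eq.mp hk1 with hk0 | hk0
            · right
              rw [pv_getD_nonneg l ' ' k (by omega), pv_getD_nonneg l ' ' j (by omega)] at h
              exact h
            · exact Or.inl hk0.symm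
        have hmb : (pvMB l (j.toNat + 1) : Int) = k + 1 :=
          pv_mb_succ l j.toNat k (by omega) hk1 (by omega) hS (by intro b hb hS' hk'; exact hI3 b (by omega) hS' hk') hext
        apply ih
        · rw [PySem.List.length_pySetD]; exact hlen
        · omega
        · omega
        · omega
        · omega
        · -- the array invariant
          intro m hm hmlen
          rw [PySem.List.pySetD_of_nonneg F (k + 1) (by omega)]
          by_cases hme : m = (j + 1).toNat
          · subst hme
            rw [List.getD_eq_getElem _ (-1) (by rw [List.length_set]; omega)]
            rw [List.getElem_set_self (by rw [List.length_set]; omega)]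
            have hne0 : (j + 1).toNat ≠ 0 := by omega
            rw [if_neg hne0]
            have : (j + 1).toNat = j.toNat + 1 := by omega
            rw [this, hmb]
          · rw [List.getD, List.getElem?_set_ne (by omega : (j+1).toNat ≠ m), ← List.getD]
            exact hF m (by omega) hmlen
        · -- the established match for the next round
          intro _
          have h1 : (k + 1).toNat = pvMB l (j.toNat + 1) := by omega
          have h2 : (j + 1).toNat = j.toNat + 1 := by omega
          rw [h1, h2]
          exact pv_mb_border l (j.toNat + 1)
        · -- no candidate above k+1 remains: vacuous by maximality
          intro b hb hbS hbk
          exfalso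
          have h2 : (j + 1).toNat = j.toNat + 1 := by omega
          rw [h2] at hbS
          have := pv_mb_greatest l (j.toNat + 1) b (by omega) hbS
          omega
        · show (2 * (n - 1 - (j+1)) + ((k+1) + 1)).toNat < fuel
          omega
      · rw [if_neg htest]
        -- the test failed: k ≥ 0, s[k] ≠ s[j], descend to fail[k]
        push_cast at htest
        have hk0 : 0 ≤ k := by
          rcases Int.le_iff_lt_or_eq.mp hk1 with h | h
          · omega
          · exact absurd (Or.inl h.symm) htest
        have hneq : pvChr l k.toNat ≠ pvChr l j.toNat := by
          intro h
          apply htest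
          right
          rw [pv_getD_nonneg l ' ' k hk0, pv_getD_nonneg l ' ' j (by omega)]
          exact h
        have hkval : PySem.List.pyGetD F k (-1) =
            if k.toNat = 0 then -1 else (pvMB l k.toNat : Int) := by
          rw [pv_getD_nonneg F (-1) k hk0]
          exact hF k.toNat (by omega) (by omega)
        have hmble : pvMB l k.toNat ≤ k.toNat - 1 := pv_mb_le l k.toNat
        apply ih
        · exact hlen
        · omega
        · omega
        · rw [hkval]; split_ifs <;> omega
        · rw [hkval]; split_ifs <;> omega
        · exact fun m hm => hF m hm
        · -- new established match
          intro hge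
          rw [hkval] at hge ⊢
          by_cases hz : k.toNat = 0
          · rw [if_pos hz] at hge; omega
          · rw [if_neg hz] at hge ⊢
            have : ((pvMB l k.toNat : Int)).toNat = pvMB l k.toNat := by omega
            rw [this]
            exact (pv_mb_border l k.toNat).trans (hS hk0)
        · -- all candidates above fail[k] have failed
          intro b hb hbS hbk
          rw [hkval] at hbk
          by_cases hcmp : k < (b : Int)
          · exact hI3 b hb hbS hcmp
          · by_cases hbeq : (b : Int) = k
            · have : b = k.toNat := by omega
              rw [this]; exact hneq
            · -- fail[k] < b < k : b would be a longer proper border of take k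
              exfalso
              have hbk' : b < k.toNat := by omega
              have hSbk : l.take b <:+ l.take k.toNat :=
                pv_suffix_of_suffix l b k.toNat j.toNat (by omega) hbS (hS hk0) (by omega)
              have := pv_mb_greatest l k.toNat b (by omega) hSbk
              by_cases hz : k.toNat = 0
              · omega
              · rw [if_neg hz] at hbk; omega
        · rw [hkval]
          split_ifs <;> omega
    · rw [if_neg hjlt]
      refine ⟨hlen, ?_⟩
      intro m hmlen
      exact hF m (by omega) hmlen

theorem pv_failA (l : List Char) (n : Int) (hn : n = l.length) :
    pvFailSpec l (pvAFail l n (2 * l.length + 2) (List.replicate l.length (-1), -1, 0)).1 := by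
  rcases Nat.eq_zero_or_pos l.length with h0 | hpos
  · rw [pvAFail]
    rw [if_neg (by omega)]
    exact ⟨by simp, fun m hm => by omega⟩
  · apply pvAFail_inv l n hn
    · simp
    · omega
    · omega
    · omega
    · omega
    · intro m hm hmlen
      have hm0 : m = 0 := by omega
      subst hm0
      rw [List.getD_eq_getElem _ (-1) (by simp; omega)]
      simp
    · intro h; omega
    · intro b hb; omega
    · omega

theorem pvBBorder_eq (l : List Char) (n : Int) (hn : n = l.length) (m : Nat)
    (hm1 : 1 ≤ m) (hm2 : (m : Int) ≤ n - 1) :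
    pvBBorder l m = (pvMB l m : Int) := by
  have hmlen : m < l.length := by omega
  unfold pvBBorder
  -- the filter's test is exactly the suffix property
  have hiff : ∀ b : Int, 0 ≤ b → b < m →
      ((PySem.List.slice l none (some b) = PySem.List.slice l (some ((m : Int) - b)) (some m)) ↔
        l.take b.toNat <:+ l.take m) := by
    intro b hb0 hbm
    rw [PySem.List.slice_to l hb0, PySem.List.slice_toNat l (by omega) (by omega)]
    rw [List.suffix_iff_eq_drop]
    have h1 : (l.take m).length = m := by simp; omega
    have h2 : (l.take b.toNat).length = b.toNat := by simp; omega
    rw [h1, h2]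
    rw [List.drop_take]
    have e1 : ((m : Int) - b).toNat = m - b.toNat := by omega
    have e2 : ((m : Int)).toNat = m := by omega
    rw [e1, e2]
  set P : Int → Bool := fun b =>
    decide (PySem.List.slice l none (some b) = PySem.List.slice l (some ((m : Int) - b)) (some m))
    with hP
  have hmem0 : (0 : Int) ∈ (PySem.List.pyRange 0 m 1).filter P := by
    rw [List.mem_filter]
    refine ⟨PySem.List.mem_pyRange_one.mpr (by omega), ?_⟩
    rw [hP]
    simp only [decide_eq_true_eq]
    rw [hiff 0 (by omega) (by omega)]
    exact (show List.take 0 l <:+ List.take m l from List.nil_suffix)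
  obtain ⟨v, hv⟩ : ∃ v, PySem.List.max? ((PySem.List.pyRange 0 m 1).filter P) (fun x => x) = some v := by
    cases hcase : PySem.List.max? ((PySem.List.pyRange 0 m 1).filter P) (fun x => x) with
    | none =>
      rw [PySem.List.max?_eq_none_iff] at hcase
      rw [hcase] at hmem0
      simp at hmem0
    | some v => exact ⟨v, rfl⟩
  have hvmem := PySem.List.max?_mem hv
  rw [List.mem_filter] at hvmem
  have hvrange := PySem.List.mem_pyRange_one.mp hvmem.1
  have hvP : l.take v.toNat <:+ l.take m := by
    have := hvmem.2
    rw [hP] at this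
    simp only [decide_eq_true_eq] at this
    exact (hiff v (by omega) (by omega)).mp this
  have hub : v.toNat ≤ pvMB l m := pv_mb_greatest l m v.toNat (by omega) hvP
  have hlb : (pvMB l m : Int) ≤ v := by
    apply PySem.List.max?_isMax hv
    rw [List.mem_filter]
    have hmb_le := pv_mb_le l m
    refine ⟨PySem.List.mem_pyRange_one.mpr (by omega), ?_⟩
    rw [hP]
    simp only [decide_eq_true_eq]
    rw [hiff (pvMB l m) (by omega) (by omega)]
    have : ((pvMB l m : Int)).toNat = pvMB l m := by omega
    rw [this]
    exact pv_mb_border l m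
  rw [hv]
  simp only [Option.getD_some]
  omega

def pvBFail (l : List Char) (n : Int) : List Int :=
  (-1) :: (PySem.List.pyRange 1 n 1).map (pvBBorder l)

theorem pv_failB (l : List Char) (n : Int) (hn : n = l.length) (_hne : n ≠ 0) :
    pvFailSpec l (pvBFail l n) := by
  constructor
  · show ((-1) :: (PySem.List.pyRange 1 n 1).map (pvBBorder l)).length = l.length
    rw [List.length_cons, List.length_map, PySem.List.length_pyRange_one]
    omega
  · intro m hmlen
    cases m with
    | zero => simp [pvBFail]
    | succ m' =>
      rw [if_neg (by omega)]
      show ((-1) :: (PySem.List.pyRange 1 n 1).map (pvBBorder l)).getD (m' + 1) (-1) = _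
      rw [List.getD_cons_succ]
      rw [List.getD, List.getElem?_map, PySem.List.getElem?_pyRange_one]
      rw [if_pos (by omega)]
      simp only [Option.map_some, Option.getD_some]
      have h1 : (1 : Int) + (m' : Int) = ((m' + 1 : Nat) : Int) := by omega
      rw [h1]
      exact pvBBorder_eq l n hn (m' + 1) (by omega) (by omega)

theorem pv_fail_read (l : List Char) (F : List Int) (hF : pvFailSpec l F) (best : Int)
    (h0 : 0 ≤ best) (h1 : best ≤ (l.length : Int) - 1) :
    PySem.List.pyGetD F best (-1) = F.getD best.toNat (-1) ∧
    -1 ≤ F.getD best.toNat (-1) ∧ F.getD best.toNat (-1) ≤ best - 1 := by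
  have he : PySem.List.pyGetD F best (-1) = F.getD best.toNat (-1) :=
    pv_getD_nonneg F (-1) best h0
  have hv := hF.2 best.toNat (by omega)
  have hmb := pv_mb_le l best.toNat
  refine ⟨he, ?_, ?_⟩ <;> rw [hv] <;> split_ifs <;> omega

theorem pvADescend_bounds (l : List Char) (F : List Int) (hF : pvFailSpec l F) (c : Char) :
    ∀ fuel : Nat, ∀ best : Int, -1 ≤ best → best ≤ (l.length : Int) - 1 →
    -1 ≤ pvADescend l F c fuel best ∧ pvADescend l F c fuel best ≤ best := by
  intro fuel
  induction fuel with
  | zero => intro best h0 h1; rw [pvADescend]; omega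
  | succ fuel ih =>
    intro best h0 h1
    rw [pvADescend]
    by_cases hc : best ≠ -1 ∧ PySem.List.pyGetD l (best + 1) ' ' ≠ c
    · rw [if_pos hc]
      obtain ⟨he, hlo, hhi⟩ := pv_fail_read l F hF best (by omega) h1
      rw [he]
      have := ih (F.getD best.toNat (-1)) hlo (by omega)
      omega
    · rw [if_neg hc]; omega

theorem pvADescend_stable (l : List Char) (F : List Int) (hF : pvFailSpec l F) (c : Char) :
    ∀ b : Nat, ∀ best : Int, ∀ fuel fuel' : Nat, (best + 1).toNat = b →
    -1 ≤ best → best ≤ (l.length : Int) - 1 →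
    b < fuel → b < fuel' →
    pvADescend l F c fuel best = pvADescend l F c fuel' best := by
  intro b
  induction b using Nat.strong_induction_on with
  | _ b ihb =>
    intro best fuel fuel' hb h0 h1 hf hf'
    obtain ⟨f, rfl⟩ : ∃ f, fuel = f + 1 := ⟨fuel - 1, by omega⟩
    obtain ⟨f', rfl⟩ : ∃ f', fuel' = f' + 1 := ⟨fuel' - 1, by omega⟩
    rw [pvADescend, pvADescend]
    by_cases hc : best ≠ -1 ∧ PySem.List.pyGetD l (best + 1) ' ' ≠ c
    · rw [if_pos hc, if_pos hc]
      obtain ⟨he, hlo, hhi⟩ := pv_fail_read l F hF best (by omega) h1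
      rw [he]
      exact ihb ((F.getD best.toNat (-1) + 1).toNat) (by omega) _ f f' rfl hlo (by omega)
        (by omega) (by omega)
    · rw [if_neg hc, if_neg hc]

def pvAAccept (l : List Char) (c : Char) (b : Int) : Int :=
  if PySem.List.pyGetD l (b + 1) ' ' = c then b + 1 else b

def pvT (l : List Char) (F : List Int) (c : Char) (m : Int) : Int :=
  pvAAccept l c (pvADescend l F c (l.length + 1) m) + 1

theorem pvT_base (l : List Char) (F : List Int) (c : Char) :
    pvT l F c (-1) = if pvChr l 0 = c then 1 else 0 := by
  have hd : pvADescend l F c (l.length + 1) (-1) = -1 := by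
    rw [pvADescend]
    rw [if_neg (by simp)]
  unfold pvT pvAAccept
  rw [hd]
  have h : ((-1 : Int) + 1) = 0 := by ring
  rw [h, pv_getD_nonneg l ' ' 0 (by omega)]
  have e0 : (0 : Int).toNat = 0 := rfl
  rw [e0]
  unfold pvChr
  split_ifs <;> ring

theorem pvT_hit (l : List Char) (F : List Int) (c : Char) (m : Int) (_h0 : 0 ≤ m)
    (hc : PySem.List.pyGetD l (m + 1) ' ' = c) : pvT l F c m = m + 2 := by
  have hd : pvADescend l F c (l.length + 1) m = m := by
    rw [pvADescend]
    rw [if_neg (by intro h; exact h.2 hc)]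
  unfold pvT pvAAccept
  rw [hd, if_pos hc]
  ring

theorem pvT_miss (l : List Char) (F : List Int) (hF : pvFailSpec l F) (c : Char) (m : Int)
    (h0 : 0 ≤ m) (hm : m ≤ (l.length : Int) - 2)
    (hc : PySem.List.pyGetD l (m + 1) ' ' ≠ c) :
    pvT l F c m = pvT l F c (F.getD m.toNat (-1)) := by
  unfold pvT
  obtain ⟨he, hlo, hhi⟩ := pv_fail_read l F hF m (by omega) (by omega)
  have hstep : pvADescend l F c (l.length + 1) m =
      pvADescend l F c (l.length + 1) (F.getD m.toNat (-1)) := by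
    conv_lhs => rw [pvADescend]
    rw [if_pos ⟨by omega, hc⟩, he]
    exact pvADescend_stable l F hF c ((F.getD m.toNat (-1) + 1).toNat) _ _ _ rfl hlo
      (by omega) (by omega) (by omega)
  rw [hstep]

theorem pvT_congr (l : List Char) (F F' : List Int) (hF : pvFailSpec l F)
    (hF' : pvFailSpec l F') (c : Char) :
    ∀ b : Nat, ∀ m : Int, (m + 1).toNat = b → -1 ≤ m → m ≤ (l.length : Int) - 2 →
    pvT l F c m = pvT l F' c m := by
  intro b
  induction b using Nat.strong_induction_on with
  | _ b ihb =>
    intro m hb h0 h1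
    rcases Int.le_iff_lt_or_eq.mp h0 with hm0 | hm0
    · by_cases hc : PySem.List.pyGetD l (m + 1) ' ' = c
      · rw [pvT_hit l F c m (by omega) hc, pvT_hit l F' c m (by omega) hc]
      · rw [pvT_miss l F hF c m (by omega) h1 hc, pvT_miss l F' hF' c m (by omega) h1 hc]
        have hv : F.getD m.toNat (-1) = F'.getD m.toNat (-1) := by
          rw [hF.2 m.toNat (by omega), hF'.2 m.toNat (by omega)]
        rw [hv]
        obtain ⟨_, hlo', hhi'⟩ := pv_fail_read l F' hF' m (by omega) (by omega)
        exact ihb ((F'.getD m.toNat (-1) + 1).toNat) (by omega) _ rfl hlo' (by omega)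
    · rw [← hm0, pvT_base, pvT_base]

theorem pvT_bounds (l : List Char) (F : List Int) (hF : pvFailSpec l F) (c : Char) (m : Int)
    (h1 : -1 ≤ m) (h2 : m ≤ (l.length : Int) - 1) :
    0 ≤ pvT l F c m ∧ pvT l F c m ≤ m + 2 := by
  unfold pvT pvAAccept
  have := pvADescend_bounds l F hF c (l.length + 1) m h1 h2
  split_ifs <;> omega

theorem pv_fold_insert_const (cs : List Char) (m0 : Int) (w : Char → Int) :
    ∀ (d : PySem.Dict (Int × Char) Int) (q : Int × Char),
    (cs.foldl (fun d c => d.insert (m0, c) (w c)) d).get? q =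
      if q.1 = m0 ∧ q.2 ∈ cs then some (w q.2) else d.get? q := by
  induction cs with
  | nil => intro d q; rw [List.foldl_nil, if_neg (by simp)]
  | cons c cs ih =>
    intro d q
    rw [List.foldl_cons, ih]
    by_cases h1 : q.1 = m0 ∧ q.2 ∈ cs
    · rw [if_pos h1, if_pos ⟨h1.1, by simp [h1.2]⟩]
    · rw [if_neg h1, PySem.Dict.get?_insert]
      by_cases h2 : q = (m0, c)
      · rw [if_pos h2, if_pos (by rw [h2]; simp)]
        rw [h2]
      · rw [if_neg h2]
        rw [if_neg (by
          rintro ⟨ha, hb⟩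
          rcases List.mem_cons.mp hb with h | h
          · exact h2 (Prod.ext ha h)
          · exact h1 ⟨ha, h⟩)]

-- the inner per-state fold: inserts the correct transitions for state m, touches nothing else

theorem pv_fold_inner (l : List Char) (F : List Int) (hF : pvFailSpec l F)
    (alphaAll : List Char) (m : Int) (h0 : 0 ≤ m) (hm : m ≤ (l.length : Int) - 2) :
    ∀ (cs : List Char) (d : PySem.Dict (Int × Char) Int), cs.Nodup →
    (∀ c ∈ cs, c ∈ alphaAll) →
    (∀ m' : Int, ∀ c' : Char, -1 ≤ m' → m' < m → c' ∈ alphaAll →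
       d.get? (m', c') = some (pvT l F c' m')) →
    (∀ q : Int × Char, q.1 ≠ m →
       (cs.foldl (fun d c => d.insert (m, c)
          (if PySem.List.pyGetD l (m + 1) ' ' = c then m + 2
           else d.getD (PySem.List.pyGetD F m (-1), c) 0)) d).get? q = d.get? q) ∧
    (∀ c' ∈ cs,
       (cs.foldl (fun d c => d.insert (m, c)
          (if PySem.List.pyGetD l (m + 1) ' ' = c then m + 2
           else d.getD (PySem.List.pyGetD F m (-1), c) 0)) d).get? (m, c') =
         some (pvT l F c' m)) ∧
    (∀ c' : Char, c' ∉ cs →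
       (cs.foldl (fun d c => d.insert (m, c)
          (if PySem.List.pyGetD l (m + 1) ' ' = c then m + 2
           else d.getD (PySem.List.pyGetD F m (-1), c) 0)) d).get? (m, c') = d.get? (m, c')) := by
  intro cs
  induction cs with
  | nil => intro d _ _ _; exact ⟨fun q _ => rfl, fun c' h => by simp at h, fun c' _ => rfl⟩
  | cons c cs ih =>
    intro d hnd hsub hinv
    obtain ⟨he, hlo, hhi⟩ := pv_fail_read l F hF m h0 (by omega)
    -- the inserted value is the correct transition
    have hval : (if PySem.List.pyGetD l (m + 1) ' ' = c then m + 2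
        else d.getD (PySem.List.pyGetD F m (-1), c) 0) = pvT l F c m := by
      by_cases hhit : PySem.List.pyGetD l (m + 1) ' ' = c
      · rw [if_pos hhit, pvT_hit l F c m h0 hhit]
      · rw [if_neg hhit, pvT_miss l F hF c m h0 hm hhit]
        rw [he, PySem.Dict.getD_eq_get?_getD]
        rw [hinv (F.getD m.toNat (-1)) c hlo (by omega) (hsub c (by simp))]
        rfl
    have hinv1 : ∀ m' : Int, ∀ c' : Char, -1 ≤ m' → m' < m → c' ∈ alphaAll →
        (d.insert (m, c) (if PySem.List.pyGetD l (m + 1) ' ' = c then m + 2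
          else d.getD (PySem.List.pyGetD F m (-1), c) 0)).get? (m', c') =
          some (pvT l F c' m') := by
      intro m' c' ha hb hc
      rw [PySem.Dict.get?_insert, if_neg (by intro h; have := congrArg Prod.fst h; simp at this; omega)]
      exact hinv m' c' ha hb hc
    obtain ⟨ih1, ih2, ih3⟩ := ih _ (by exact hnd.of_cons) (fun c hc => hsub c (by simp [hc])) hinv1
    refine ⟨?_, ?_, ?_⟩
    · intro q hq
      rw [List.foldl_cons, ih1 q hq]
      rw [PySem.Dict.get?_insert, if_neg (by intro h; apply hq; rw [h])]
    · intro c' hc'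
      rcases List.mem_cons.mp hc' with hcc | hcc
      · subst hcc
        have hnotin : c' ∉ cs := (List.nodup_cons.mp hnd).1
        rw [List.foldl_cons, ih3 c' hnotin]
        rw [PySem.Dict.get?_insert, if_pos rfl, hval]
      · rw [List.foldl_cons]
        exact ih2 c' hcc
    · intro c' hc'
      have h1 : c' ∉ cs := fun h => hc' (by simp [h])
      have h2 : c' ≠ c := fun h => hc' (by simp [h])
      rw [List.foldl_cons, ih3 c' h1]
      rw [PySem.Dict.get?_insert, if_neg (by intro h; exact h2 (congrArg Prod.snd h))]

theorem pvBTable_lookup (l : List Char) (F : List Int) (hF : pvFailSpec l F) (n : Int)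
    (hn : n = l.length) (_hne : n ≠ 0) :
    ∀ m : Int, ∀ c : Char, c ∈ l → -1 ≤ m → m ≤ n - 2 →
    (pvBTable l F (PySem.Set.ofList l) n).get? (m, c) = some (pvT l F c m) := by
  have hbase : ∀ m : Int, ∀ c : Char, c ∈ l → -1 ≤ m → m < 0 →
      ((PySem.Set.ofList l).foldl (fun d c =>
        d.insert (-1, c) (if PySem.List.pyGetD l 0 ' ' = c then 1 else 0))
        PySem.Dict.empty).get? (m, c) = some (pvT l F c m) := by
    intro m c hc h1 h2
    have hm : m = -1 := by omega
    subst hm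
    rw [pv_fold_insert_const]
    rw [if_pos ⟨rfl, (PySem.Set.mem_ofList l c).mpr hc⟩]
    rw [pvT_base]
    rw [pv_getD_nonneg l ' ' 0 (by omega)]
    rfl
  have houter : ∀ M : Nat, (M : Int) ≤ n - 1 →
      ∀ m : Int, ∀ c : Char, c ∈ l → -1 ≤ m → m < M →
      ((PySem.List.pyRange 0 M 1).foldl (fun d m =>
        (PySem.Set.ofList l).foldl (fun d c =>
          d.insert (m, c) (if PySem.List.pyGetD l (m + 1) ' ' = c then m + 2
                           else d.getD (PySem.List.pyGetD F m (-1), c) 0)) d)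
        ((PySem.Set.ofList l).foldl (fun d c =>
          d.insert (-1, c) (if PySem.List.pyGetD l 0 ' ' = c then 1 else 0))
          PySem.Dict.empty)).get? (m, c) = some (pvT l F c m) := by
    intro M
    induction M with
    | zero =>
      intro _ m c hc h1 h2
      simp only [Nat.cast_zero]
      rw [show PySem.List.pyRange 0 0 1 = [] from PySem.List.pyRange_one_eq_nil (by omega)]
      rw [List.foldl_nil]
      exact hbase m c hc h1 (by omega)
    | succ M ihM =>
      intro hM m c hc h1 h2
      rw [show ((M + 1 : Nat) : Int) = (M : Int) + 1 by omega]
      rw [PySem.List.pyRange_one_succ_right (by omega : (0:Int) ≤ (M:Int))]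
      rw [List.foldl_append, List.foldl_cons, List.foldl_nil]
      obtain ⟨hu, hins, _⟩ := pv_fold_inner l F hF (PySem.Set.ofList l) (M : Int) (by omega)
        (by omega) (PySem.Set.ofList l) _ (PySem.Set.nodup_ofList l) (fun c hc => hc)
        (fun m' c' ha hb hc' => ihM (by omega) m' c'
          ((PySem.Set.mem_ofList l c').mp hc') ha hb)
      by_cases hcmp : m < (M : Int)
      · rw [hu (m, c) (by simp; omega)]
        exact ihM (by omega) m c hc h1 hcmp
      · have : m = (M : Int) := by omega
        subst this
        exact hins c ((PySem.Set.mem_ofList l c).mpr hc)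
  intro m c hc h1 h2
  unfold pvBTable
  have hM : ((n - 1).toNat : Int) = n - 1 := by
    have : (0:Int) ≤ n - 1 := by
      have : (0:Int) ≤ (l.length : Int) := by positivity
      omega
    omega
  have := houter (n - 1).toNat (by omega) m c hc h1 (by omega)
  rw [hM] at this
  exact this

theorem pv_scan (l : List Char) (FA FB : List Int) (hFA : pvFailSpec l FA)
    (hFB : pvFailSpec l FB) (n : Int) (hn : n = l.length) (hne : n ≠ 0) :
    ∀ r : List Char, ∀ t p : Int,
    t + r.length = n → (∀ c ∈ r, c ∈ l) → 0 ≤ p → p ≤ t →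
    r.foldl (fun p c => (pvBTable l FB (PySem.Set.ofList l) n).getD (p - 1, c) 0) p =
    r.foldl (fun p c => pvT l FA c (p - 1)) p := by
  intro r
  induction r with
  | nil => intro t p _ _ _ _; rfl
  | cons c r ih =>
    intro t p hlen hsub h0 ht
    have hcl : c ∈ l := hsub c (by simp)
    have hrlen : (r.length : Int) = n - t - 1 := by
      simp at hlen; omega
    have hstep : (pvBTable l FB (PySem.Set.ofList l) n).getD (p - 1, c) 0 =
        pvT l FA c (p - 1) := by
      rw [PySem.Dict.getD_eq_get?_getD]
      rw [pvBTable_lookup l FB hFB n hn hne (p - 1) c hcl (by omega) (by omega)]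
      show pvT l FB c (p - 1) = pvT l FA c (p - 1)
      exact (pvT_congr l FA FB hFA hFB c ((p - 1 + 1).toNat) (p - 1) rfl (by omega)
        (by omega)).symm
    rw [List.foldl_cons, List.foldl_cons, hstep]
    have hb := pvT_bounds l FA hFA c (p - 1) (by omega) (by omega)
    exact ih (t + 1) (pvT l FA c (p - 1)) (by simp at hlen ⊢; omega)
      (fun c hc => hsub c (by simp [hc])) (by omega) (by omega)

theorem pv_shift (l : List Char) (F : List Int) :
    ∀ r : List Char, ∀ x : Int,
    (r.foldl (fun best c => pvAAccept l c (pvADescend l F c (l.length + 1) best)) x) + 1 =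
    r.foldl (fun p c => pvT l F c (p - 1)) (x + 1) := by
  intro r
  induction r with
  | nil => intro x; rfl
  | cons c r ih =>
    intro x
    rw [List.foldl_cons, List.foldl_cons]
    have e : pvT l F c (x + 1 - 1) = pvAAccept l c (pvADescend l F c (l.length + 1) x) + 1 := by
      have e1 : x + 1 - 1 = x := by ring
      rw [e1]
      rfl
    rw [e]
    exact ih _

theorem pv_rev_range (l : List Char) (n : Int) (hn : n = l.length) :
    (PySem.List.pyRange (n - 1) (-1) (-1)).map (fun i => PySem.List.pyGetD l i ' ') =
    l.reverse := by
  rw [PySem.List.pyRange_neg_one_eq_reverse]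
  rw [List.map_reverse]
  have h : (-1 : Int) + 1 = 0 := by ring
  rw [h]
  have h2 : n - 1 + 1 = (l.length : Int) := by omega
  rw [h2]
  congr 1
  exact PySem.List.map_pyGetD_pyRange_zero' l ' '

theorem pv_main : ∀ (s : String),
    get_longest_palindrome_prefix s = get_longest_palindrome_prefix_alt s := by
  intro s
  unfold get_longest_palindrome_prefix get_longest_palindrome_prefix_alt
  dsimp only
  rw [PySem.Str.len_eq]
  set l := s.toList with hl
  by_cases h0 : l.length = 0
  · rw [if_pos (by rw [h0]; rfl)]
    rw [h0]
    show ((PySem.List.pyRange ((0 : Int) - 1) (-1) (-1)).foldl _ (-1)) + 1 = 0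
    rw [show ((0 : Int) - 1) = -1 by ring]
    rw [PySem.List.pyRange_neg_one_eq_nil (by omega)]
    rw [List.foldl_nil]
    ring
  · have hne : ((l.length : Int)) ≠ 0 := by
      intro h; apply h0; omega
    rw [if_neg hne]
    set n : Int := (l.length : Int) with hn
    set FA := (pvAFail l n (2 * l.length + 2) (List.replicate l.length (-1), -1, 0)).1
      with hFAdef
    set FB := (-1) :: (PySem.List.pyRange 1 n 1).map (pvBBorder l) with hFBdef
    have hFA : pvFailSpec l FA := pv_failA l n hn
    have hFB : pvFailSpec l FB := pv_failB l n hn hne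
    -- rewrite A's loop body into the composed form
    have hbody : ∀ r : List Int, ∀ init : Int,
        r.foldl (fun best i =>
          let best := pvADescend l FA (PySem.List.pyGetD l i ' ') (l.length + 1) best
          if PySem.List.pyGetD l (best + 1) ' ' = PySem.List.pyGetD l i ' '
          then best + 1 else best) init =
        r.foldl (fun best i => pvAAccept l (PySem.List.pyGetD l i ' ')
          (pvADescend l FA (PySem.List.pyGetD l i ' ') (l.length + 1) best)) init := by
      intro r init
      rfl
    rw [hbody]
    have hmap := List.foldl_map (f := fun i => PySem.List.pyGetD l i ' ')
      (g := fun best c => pvAAccept l c (pvADescend l FA c (l.length + 1) best))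
      (l := PySem.List.pyRange (n - 1) (-1) (-1)) (init := (-1 : Int))
    rw [← hmap]
    rw [pv_rev_range l n hn]
    rw [pv_shift l FA l.reverse (-1)]
    rw [show ((-1 : Int) + 1) = 0 by ring]
    rw [← pv_scan l FA FB hFA hFB n hn hne l.reverse 0 0 (by simp; omega) (by simp) (by omega)
      (by omega)]

-- ===== VERDICT (by name: the statement is the Claim_ definition above) =====
theorem get_longest_palindrome_prefix_spec : Claim_equal_get_longest_palindrome_prefix := by
  intro s _
  unfold Spec_get_longest_palindrome_prefix
  exact pv_main s
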